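-- pv_equiv track=rewrite | github.com/lcheeee/oplib | src/analysis/mergers/result_aggregator.py | _consensus_merge
-- ===== SOURCE A (Python) =====
-- from typing import Any, Dict, List
--
-- def _consensus_merge(results: List[Dict[str, Any]]) -> Dict[str, Any]:
--     """共识合并。"""
--     aggregated = {}
--
--     # 收集所有布尔结果
--     boolean_results = {}
--     for result in results:
--         for key, value in result.items():
--             if isinstance(value, bool):
--                 if key not in boolean_results:
--                     boolean_results[key] = []
--                 boolean_results[key].append(value)
--
--     # 计算共识（所有值都相同时才为真）
--     for key, values in boolean_results.items():
--         if values: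
--             # 检查是否所有值都相同
--             if all(v == values[0] for v in values):
--                 aggregated[key] = values[0]
--             else:
--                 # 不一致，使用多数投票
--                 true_count = sum(1 for v in values if v)
--                 false_count = len(values) - true_count
--                 aggregated[key] = true_count > false_count
--
--     return aggregated
-- ===== SOURCE B (Python) =====
-- from typing import Any, Dict, List
--
-- def _consensus_merge(results: List[Dict[str, Any]]) -> Dict[str, Any]:
--     """Consensus merge via per-key running counters and a single majority rule."""
--     counts = {}
--     for result in results:
--         for key, value in result.items():
--             if isinstance(value, bool):
--                 t, n = counts.get(key, (0, 0))
--                 counts[key] = (t + (1 if value else 0), n + 1)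
--     return {key: 2 * t > n for key, (t, n) in counts.items()}
-- ===== Notes on version B (the rewrite author's own statement) =====
-- stated objective: simpler
-- what changed: Replaces collecting per-key lists of booleans plus a separate all-values-equal branch and majority vote with a single pass maintaining (true_count, total) counters per key and one majority test 2*t > n, which subsumes the all-equal case.
import Mathlib
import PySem

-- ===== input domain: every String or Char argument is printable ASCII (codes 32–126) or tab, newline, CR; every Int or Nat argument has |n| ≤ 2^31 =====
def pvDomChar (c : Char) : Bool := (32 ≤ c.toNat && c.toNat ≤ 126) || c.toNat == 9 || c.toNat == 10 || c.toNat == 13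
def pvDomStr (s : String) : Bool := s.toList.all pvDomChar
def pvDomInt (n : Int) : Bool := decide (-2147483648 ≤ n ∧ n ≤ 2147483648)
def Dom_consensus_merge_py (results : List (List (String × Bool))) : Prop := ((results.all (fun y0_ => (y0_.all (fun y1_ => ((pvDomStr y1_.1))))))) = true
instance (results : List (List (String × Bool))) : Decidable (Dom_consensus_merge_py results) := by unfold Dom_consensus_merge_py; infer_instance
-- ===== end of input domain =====

-- B replaces A's per-key lists of booleans and its separate all-equal branch by per-key
-- (true_count, total) counters and a single majority test 2*t > n (objective: simpler).

-- ===== PORT A =====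
-- isinstance(value, bool) is always true here: values are Bool by the type convention.
def consensus_merge_py (results : List (List (String × Bool))) : List (String × Bool) :=
  let boolean_results : PySem.Dict String (List Bool) :=
    results.foldl (fun br result =>
      result.foldl (fun br p =>
        let br := if br.contains p.1 then br else br.insert p.1 ([] : List Bool)
        br.modify p.1 [] (fun vs => vs ++ [p.2])) br)
      PySem.Dict.empty
  let aggregated : PySem.Dict String Bool :=
    boolean_results.items.foldl (fun agg p =>
      if p.2.isEmpty then agg
      else if p.2.all (fun v => v == p.2.head!) then
        agg.insert p.1 p.2.head!
      else
        let true_count := (p.2.filter (fun v => v)).length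
        let false_count := p.2.length - true_count
        agg.insert p.1 (decide (true_count > false_count))) PySem.Dict.empty
  aggregated.items

-- ===== PORT B =====
def consensus_merge_py_alt (results : List (List (String × Bool))) : List (String × Bool) :=
  let counts : PySem.Dict String (Int × Int) :=
    results.foldl (fun c result =>
      result.foldl (fun c p =>
        c.modify p.1 ((0 : Int), (0 : Int))
          (fun tn => (tn.1 + (if p.2 then 1 else 0), tn.2 + 1))) c)
      PySem.Dict.empty
  (counts.items.foldl (fun agg p => agg.insert p.1 (decide (2 * p.2.1 > p.2.2)))
    (PySem.Dict.empty : PySem.Dict String Bool)).items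

-- ===== PRECONDITION & SPEC =====
def Spec_consensus_merge_py (results : List (List (String × Bool))) (out : List (String × Bool)) : Prop := out = consensus_merge_py_alt results
instance (results : List (List (String × Bool))) (out : List (String × Bool)) : Decidable (Spec_consensus_merge_py results out) := by unfold Spec_consensus_merge_py; infer_instance

-- ===== CLAIM (what is proved, stated in full; the proofs are below) =====
def Claim_equal_consensus_merge_py : Prop := ∀ (results : List (List (String × Bool))), Dom_consensus_merge_py results → Spec_consensus_merge_py results (consensus_merge_py results)

-- ===== LEMMAS AND PROOFS =====

-- A's grouping step (setdefault-to-[] then append) is exactly a single modify with default [].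
lemma stepA_eq_modify (d : PySem.Dict String (List Bool)) (p : String × Bool) :
    ((if d.contains p.1 then d else d.insert p.1 ([] : List Bool)).modify p.1 []
        (fun vs => vs ++ [p.2]))
      = d.modify p.1 [] (fun vs => vs ++ [p.2]) := by
  by_cases h : d.contains p.1 = true
  · simp [h]
  · simp only [Bool.not_eq_true] at h
    rw [if_neg (by simp [h]), PySem.Dict.modify, PySem.Dict.modify,
        PySem.Dict.getD_insert_self, PySem.Dict.insert_insert_self,
        PySem.Dict.getD_of_not_contains _ _ h]

lemma decision_eq (g : List Bool) (hg : g ≠ []) :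
    (if g.all (fun v => v == g.head!) then g.head!
     else decide ((g.filter (fun v => v)).length > g.length - (g.filter (fun v => v)).length))
      = decide ((2 : Int) * ((g.filter (fun v => v)).length : Int) > (g.length : Int)) := by
  obtain ⟨b, t, rfl⟩ : ∃ b t, g = b :: t := by
    cases g with
    | nil => exact absurd rfl hg
    | cons b t => exact ⟨b, t, rfl⟩
  have hle : ((b :: t).filter (fun v => v)).length ≤ (b :: t).length :=
    List.length_filter_le _ _
  by_cases hall : (b :: t).all (fun v => v == (b :: t).head!) = true
  · rw [if_pos hall]
    simp only [List.head!] at hall ⊢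
    cases b
    · have hnil : ((false :: t).filter (fun v => v)).length = 0 := by
        simp only [List.length_eq_zero_iff]
        rw [List.filter_eq_nil_iff]
        intro x hx
        have := (List.all_eq_true.mp hall) x hx
        simp at this
        simp [this]
      rw [hnil]; simp; positivity
    · have hfull : ((true :: t).filter (fun v => v)).length = (true :: t).length := by
        rw [List.filter_eq_self.mpr]
        intro x hx
        have := (List.all_eq_true.mp hall) x hx
        simpa using this
      rw [hfull]
      simp only [List.length_cons]
      symm
      rw [decide_eq_true_iff]
      push_cast
      omega
  · rw [if_neg hall]
    rw [decide_eq_decide]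
    constructor
    · intro h; omega
    · intro h
      have h2 : 2 * ((b :: t).filter (fun v => v)).length > (b :: t).length := by
        exact_mod_cast (by omega : (2:Int) * ((b :: t).filter (fun v => v)).length > ((b :: t).length : Int))
      omega

lemma getD_countfold (l : List (String × Bool)) (d : PySem.Dict String (Int × Int)) (k : String) :
    (l.foldl (fun c p =>
        c.modify p.1 ((0 : Int), (0 : Int))
          (fun tn => (tn.1 + (if p.2 then 1 else 0), tn.2 + 1))) d).getD k (0, 0)
      = ((d.getD k (0, 0)).1 + (((l.filter (fun p => p.1 == k)).map (·.2)).filter (fun v => v)).length,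
         (d.getD k (0, 0)).2 + ((l.filter (fun p => p.1 == k)).map (·.2)).length) := by
  induction l generalizing d with
  | nil => simp
  | cons p l ih =>
    rw [List.foldl_cons, ih, PySem.Dict.getD_modify]
    by_cases hk : k = p.1
    · subst hk
      rw [if_pos rfl]
      cases hv : p.2 <;> simp [hv, Prod.ext_iff] <;> omega
    · rw [if_neg hk]
      have hb : (p.1 == k) = false := by
        simp; exact fun h => hk h.symm
      simp [hb]

-- both dicts built over the flattened pairs describe the same keys/groups; ports agree
lemma merge_eq (results : List (List (String × Bool))) :
    consensus_merge_py results = consensus_merge_py_alt results := by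
  unfold consensus_merge_py consensus_merge_py_alt
  simp only []
  rw [← List.foldl_flatten, ← List.foldl_flatten]
  set l := results.flatten with hl
  -- A's grouping fold is a plain modify fold
  have hstep : (fun (br : PySem.Dict String (List Bool)) (p : String × Bool) =>
      let br := if br.contains p.1 then br else br.insert p.1 ([] : List Bool)
      br.modify p.1 [] (fun vs => vs ++ [p.2]))
      = fun br p => br.modify p.1 [] (fun vs => vs ++ [p.2]) :=
    funext fun br => funext fun p => stepA_eq_modify br p
  rw [hstep]
  set br := l.foldl (fun br p => br.modify p.1 [] (fun vs => vs ++ [p.2]))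
    (PySem.Dict.empty : PySem.Dict String (List Bool)) with hbr
  set cnt := l.foldl (fun c p =>
      c.modify p.1 ((0 : Int), (0 : Int))
        (fun tn => (tn.1 + (if p.2 then 1 else 0), tn.2 + 1)))
    (PySem.Dict.empty : PySem.Dict String (Int × Int)) with hcnt
  have hKa : br.keys = PySem.Set.ofList (l.map (·.1)) := by
    rw [hbr, PySem.Dict.keys_foldl_modify_key l (·.1) [] (fun _ p => (· ++ [p.2])),
        PySem.Dict.keys_empty, PySem.Set.update_nil_left]
  have hKb : cnt.keys = PySem.Set.ofList (l.map (·.1)) := by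
    rw [hcnt, PySem.Dict.keys_foldl_modify_key l (·.1) ((0:Int),(0:Int))
          (fun _ p tn => (tn.1 + (if p.2 then 1 else 0), tn.2 + 1)),
        PySem.Dict.keys_empty, PySem.Set.update_nil_left]
  have hnd : (PySem.Set.ofList (l.map (·.1)) : List String).Nodup := PySem.Set.nodup_ofList _
  have hgA : ∀ k, br.getD k [] = (l.filter (fun p => p.1 == k)).map (·.2) := by
    intro k
    rw [hbr, PySem.Dict.getD_foldl_modify_append, PySem.Dict.getD_empty, List.nil_append]
  have hgB : ∀ k, cnt.getD k (0, 0) =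
      (((((l.filter (fun p => p.1 == k)).map (·.2)).filter (fun v => v)).length : Int),
        (((l.filter (fun p => p.1 == k)).map (·.2)).length : Int)) := by
    intro k
    rw [hcnt, getD_countfold, PySem.Dict.getD_empty]
    simp
  have hitemsA : br.items = (PySem.Set.ofList (l.map (·.1))).map
      (fun k => (k, (l.filter (fun p => p.1 == k)).map (·.2))) := by
    rw [PySem.Dict.items_eq_map_keys br (hKa ▸ hnd) [], hKa]
    exact List.map_congr_left fun k _ => by rw [hgA]
  have hitemsB : cnt.items = (PySem.Set.ofList (l.map (·.1))).map
      (fun k => (k, ((((l.filter (fun p => p.1 == k)).map (·.2)).filter (fun v => v)).length : Int),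
          (((l.filter (fun p => p.1 == k)).map (·.2)).length : Int))) := by
    rw [PySem.Dict.items_eq_map_keys cnt (hKb ▸ hnd) ((0:Int),(0:Int)), hKb]
    exact List.map_congr_left fun k _ => by rw [hgB]
  -- every collected group is nonempty
  have hne : ∀ p ∈ br.items, p.2 ≠ [] := by
    intro p hp
    rw [hitemsA] at hp
    obtain ⟨k, hk, rfl⟩ := List.mem_map.mp hp
    have hk' := (PySem.Set.mem_ofList _ _).mp hk
    obtain ⟨q, hq, rfl⟩ := List.mem_map.mp hk'
    simp only [ne_eq, List.map_eq_nil_iff, List.filter_eq_nil_iff]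
    intro h
    exact absurd (beq_self_eq_true q.1) (by simpa using h q hq)
  -- A's aggregation fold becomes a plain insert of the majority decision
  have hcong := PySem.List.foldl_congr_mem br.items
    (fun agg p =>
      if p.2.isEmpty then agg
      else if p.2.all (fun v => v == p.2.head!) then
        agg.insert p.1 p.2.head!
      else
        agg.insert p.1 (decide ((p.2.filter (fun v => v)).length >
          p.2.length - (p.2.filter (fun v => v)).length)))
    (fun agg p => agg.insert p.1
      (decide ((2 : Int) * ((p.2.filter (fun v => v)).length : Int) > (p.2.length : Int))))
    (PySem.Dict.empty : PySem.Dict String Bool)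
    (by
      intro acc p hp
      have h2 := hne p hp
      beta_reduce
      rw [if_neg (by simpa [List.isEmpty_iff] using h2)]
      rw [← apply_ite (acc.insert p.1), decision_eq p.2 h2])
  rw [hcong]
  rw [PySem.Dict.items_foldl_insert_fresh br.items (·.1) _ _
        (fun a _ => PySem.Dict.contains_empty _)
        (by rw [show br.items.map (·.1) = br.keys from rfl, hKa]; exact hnd),
      PySem.Dict.items_foldl_insert_fresh cnt.items (·.1) _ _
        (fun a _ => PySem.Dict.contains_empty _)
        (by rw [show cnt.items.map (·.1) = cnt.keys from rfl, hKb]; exact hnd)]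
  rw [hitemsA, hitemsB]
  simp [List.map_map, Function.comp]

-- ===== VERDICT (by name: the statement is the Claim_ definition above) =====
theorem consensus_merge_py_spec : Claim_equal_consensus_merge_py := by
  intro results _
  unfold Spec_consensus_merge_py
  exact merge_eq results
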